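-- pv_equiv track=rewrite | github.com/masneltef/InfoSec | Homework2_TLS_Handshake/src/main.py | negotiate_version
-- ===== SOURCE A (Python) =====
-- def negotiate_version(client_versions, server_versions):
--     common_versions = set(client_versions) & set(server_versions)
--     if not common_versions:
--         raise ValueError("No common TLS version found")
--
--     version_priority = ['TLS 1.3', 'TLS 1.2', 'TLS 1.1', 'TLS 1.0']
--     for version in version_priority:
--         if version in common_versions:
--             return version
--
--     raise ValueError("No valid TLS version found")
-- ===== SOURCE B (Python) =====
-- def negotiate_version(client_versions, server_versions):
--     priority_index = {'TLS 1.3': 0, 'TLS 1.2': 1, 'TLS 1.1': 2, 'TLS 1.0': 3}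
--     common = set(client_versions) & set(server_versions)
--     if not common:
--         raise ValueError("No common TLS version found")
--     candidates = [v for v in common if v in priority_index]
--     if not candidates:
--         raise ValueError("No valid TLS version found")
--     return min(candidates, key=lambda v: priority_index[v])
-- ===== Notes on version B (the rewrite author's own statement) =====
-- stated objective: alternative
-- what changed: Replaces the in-order scan of the hard-coded priority list with a rank table built once plus a min-by-rank reduction over the common set; the two ValueError conditions are preserved exactly.
import Mathlib
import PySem

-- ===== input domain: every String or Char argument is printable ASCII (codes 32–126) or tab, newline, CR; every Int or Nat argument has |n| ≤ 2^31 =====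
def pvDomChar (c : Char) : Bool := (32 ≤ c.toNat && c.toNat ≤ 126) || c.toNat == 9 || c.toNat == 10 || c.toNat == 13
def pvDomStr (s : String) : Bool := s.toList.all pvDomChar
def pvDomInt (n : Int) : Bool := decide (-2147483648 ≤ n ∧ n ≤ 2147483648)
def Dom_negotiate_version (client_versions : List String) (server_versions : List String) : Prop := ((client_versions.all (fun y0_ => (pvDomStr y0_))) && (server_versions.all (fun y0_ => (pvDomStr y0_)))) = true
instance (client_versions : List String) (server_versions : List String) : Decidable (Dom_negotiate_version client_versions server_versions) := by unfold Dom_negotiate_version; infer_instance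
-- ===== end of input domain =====

-- B replaces A's in-order scan of the priority list by a rank table plus a min-by-rank
-- reduction over the common set (alternative decomposition, same cost).

-- ===== PORT A =====
def negotiate_version (client_versions : List String) (server_versions : List String) : String :=
  let common_versions := PySem.Set.inter (PySem.Set.ofList client_versions) (PySem.Set.ofList server_versions)
  if common_versions = [] then ""  -- Python: raise ValueError("No common TLS version found"); outside Pre_
  else
    match ["TLS 1.3", "TLS 1.2", "TLS 1.1", "TLS 1.0"].find? (fun version => common_versions.contains version) with
    | some version => version
    | none => ""  -- Python: raise ValueError("No valid TLS version found"); outside Pre_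

-- ===== PORT B =====
def pvRankDict : PySem.Dict String Int :=
  PySem.Dict.ofList [("TLS 1.3", 0), ("TLS 1.2", 1), ("TLS 1.1", 2), ("TLS 1.0", 3)]

-- priority_index[v]; candidates are always keys of the dict, so the default 4 is never used
def pvRank (v : String) : Int := PySem.Dict.getD pvRankDict v 4

def negotiate_version_alt (client_versions : List String) (server_versions : List String) : String :=
  let common := PySem.Set.inter (PySem.Set.ofList client_versions) (PySem.Set.ofList server_versions)
  if common = [] then ""  -- Python: raise ValueError("No common TLS version found"); outside Pre_
  else
    let candidates := common.filter (fun v => pvRankDict.contains v)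
    match PySem.List.min? candidates pvRank with
    | some v => v
    | none => ""  -- Python: raise ValueError("No valid TLS version found"); outside Pre_

-- ===== PRECONDITION & SPEC =====
-- Pre_ excludes exactly the inputs on which A raises ValueError (no common version, or no
-- common version among the four known TLS versions); B raises the same errors there.
def Pre_negotiate_version (client_versions : List String) (server_versions : List String) : Prop :=
  ("TLS 1.3" ∈ client_versions ∧ "TLS 1.3" ∈ server_versions) ∨
  ("TLS 1.2" ∈ client_versions ∧ "TLS 1.2" ∈ server_versions) ∨
  ("TLS 1.1" ∈ client_versions ∧ "TLS 1.1" ∈ server_versions) ∨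
  ("TLS 1.0" ∈ client_versions ∧ "TLS 1.0" ∈ server_versions)

instance (client_versions : List String) (server_versions : List String) : Decidable (Pre_negotiate_version client_versions server_versions) := by
  unfold Pre_negotiate_version; infer_instance

def pvWitness_negotiate_version : List String × List String :=
  (["TLS 1.0", "TLS 1.2"], ["TLS 1.2", "SSLv3"])

def Spec_negotiate_version (client_versions : List String) (server_versions : List String) (out : String) : Prop := out = negotiate_version_alt client_versions server_versions
instance (client_versions : List String) (server_versions : List String) (out : String) : Decidable (Spec_negotiate_version client_versions server_versions out) := by unfold Spec_negotiate_version; infer_instance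

-- ===== CLAIM (what is proved, stated in full; the proofs are below) =====
def Claim_equal_negotiate_version : Prop := ∀ (client_versions : List String) (server_versions : List String), Dom_negotiate_version client_versions server_versions → Pre_negotiate_version client_versions server_versions → Spec_negotiate_version client_versions server_versions (negotiate_version client_versions server_versions)

-- ===== LEMMAS AND PROOFS =====

theorem main_lemma (c s : List String) (hpre : Pre_negotiate_version c s) :
    negotiate_version c s = negotiate_version_alt c s := by
  unfold negotiate_version negotiate_version_alt
  set common := PySem.Set.inter (PySem.Set.ofList c) (PySem.Set.ofList s) with hcom
  have hmem : ∀ v, v ∈ common ↔ v ∈ c ∧ v ∈ s := by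
    intro v; simp [hcom, PySem.Set.mem_inter, PySem.Set.mem_ofList]
  -- some priority version is in common
  have hv0 : ∃ v0, v0 ∈ common ∧ (v0 = "TLS 1.3" ∨ v0 = "TLS 1.2" ∨ v0 = "TLS 1.1" ∨ v0 = "TLS 1.0") := by
    rcases hpre with ⟨h1, h2⟩ | ⟨h1, h2⟩ | ⟨h1, h2⟩ | ⟨h1, h2⟩
    · exact ⟨_, (hmem _).2 ⟨h1, h2⟩, Or.inl rfl⟩
    · exact ⟨_, (hmem _).2 ⟨h1, h2⟩, Or.inr (Or.inl rfl)⟩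
    · exact ⟨_, (hmem _).2 ⟨h1, h2⟩, Or.inr (Or.inr (Or.inl rfl))⟩
    · exact ⟨_, (hmem _).2 ⟨h1, h2⟩, Or.inr (Or.inr (Or.inr rfl))⟩
  obtain ⟨v0, hv0mem, hv0cases⟩ := hv0
  have hne : ¬ (common = []) := by intro h; rw [h] at hv0mem; exact absurd hv0mem (List.not_mem_nil)
  rw [if_neg hne, if_neg hne]
  -- candidates of B
  set cand := common.filter (fun v => pvRankDict.contains v) with hcand
  have hcmem : ∀ v, v ∈ cand ↔ v ∈ common ∧ (v = "TLS 1.3" ∨ v = "TLS 1.2" ∨ v = "TLS 1.1" ∨ v = "TLS 1.0") := by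
    intro v
    have hdc : pvRankDict.contains v = true ↔ (v = "TLS 1.3" ∨ v = "TLS 1.2" ∨ v = "TLS 1.1" ∨ v = "TLS 1.0") := by
      have hmk : pvRankDict = PySem.Dict.mk [("TLS 1.3", 0), ("TLS 1.2", 1), ("TLS 1.1", 2), ("TLS 1.0", 3)] := by decide
      rw [hmk]
      simp [PySem.Dict.contains_mk]
      constructor
      · rintro (h | h | h | h) <;> simp [← h]
      · rintro (rfl | rfl | rfl | rfl) <;> simp
    simp [hcand, List.mem_filter, hdc]
  have hv0cand : v0 ∈ cand := (hcmem v0).2 ⟨hv0mem, hv0cases⟩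
  have hcandne : cand ≠ [] := by intro h; rw [h] at hv0cand; exact absurd hv0cand (List.not_mem_nil)
  -- min? returns some m
  obtain ⟨m, hm⟩ : ∃ m, PySem.List.min? cand pvRank = some m := by
    cases hmin : PySem.List.min? cand pvRank with
    | none => exact absurd ((PySem.List.min?_eq_none_iff _ _).1 hmin) hcandne
    | some m => exact ⟨m, rfl⟩
  have hmmem := PySem.List.min?_mem hm
  have hmmin := PySem.List.min?_isMin hm
  obtain ⟨hmcommon, hmcases⟩ := (hcmem m).1 hmmem
  show (match List.find? (fun version => common.contains version) ["TLS 1.3", "TLS 1.2", "TLS 1.1", "TLS 1.0"] with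
    | some version => version
    | none => "") = (match PySem.List.min? cand pvRank with
    | some v => v
    | none => "")
  rw [hm]
  -- evaluate A's find? by case analysis on membership of the four versions in common
  have hcont : ∀ v : String, common.contains v = true ↔ v ∈ common := by
    intro v; exact List.contains_iff_mem
  by_cases h3 : "TLS 1.3" ∈ common
  · have : common.contains "TLS 1.3" = true := (hcont _).2 h3
    simp only [List.find?, this]
    -- A returns "TLS 1.3"; show m = "TLS 1.3"
    have hle := hmmin _ ((hcmem _).2 ⟨h3, Or.inl rfl⟩)
    rcases hmcases with rfl | rfl | rfl | rfl
    · rfl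
    · exact absurd hle (by decide)
    · exact absurd hle (by decide)
    · exact absurd hle (by decide)
  · have e3 : common.contains "TLS 1.3" = false := by
      rw [← Bool.not_eq_true]; intro h; exact h3 ((hcont _).1 h)
    have m3 : m ≠ "TLS 1.3" := by rintro rfl; exact h3 hmcommon
    by_cases h2 : "TLS 1.2" ∈ common
    · have : common.contains "TLS 1.2" = true := (hcont _).2 h2
      simp only [List.find?, e3, this]
      have hle := hmmin _ ((hcmem _).2 ⟨h2, Or.inr (Or.inl rfl)⟩)
      rcases hmcases with rfl | rfl | rfl | rfl
      · exact absurd rfl m3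
      · rfl
      · exact absurd hle (by decide)
      · exact absurd hle (by decide)
    · have e2 : common.contains "TLS 1.2" = false := by
        rw [← Bool.not_eq_true]; intro h; exact h2 ((hcont _).1 h)
      have m2 : m ≠ "TLS 1.2" := by rintro rfl; exact h2 hmcommon
      by_cases h1 : "TLS 1.1" ∈ common
      · have : common.contains "TLS 1.1" = true := (hcont _).2 h1
        simp only [List.find?, e3, e2, this]
        have hle := hmmin _ ((hcmem _).2 ⟨h1, Or.inr (Or.inr (Or.inl rfl))⟩)
        rcases hmcases with rfl | rfl | rfl | rfl
        · exact absurd rfl m3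
        · exact absurd rfl m2
        · rfl
        · exact absurd hle (by decide)
      · have e1 : common.contains "TLS 1.1" = false := by
          rw [← Bool.not_eq_true]; intro h; exact h1 ((hcont _).1 h)
        have m1 : m ≠ "TLS 1.1" := by rintro rfl; exact h1 hmcommon
        have h0 : "TLS 1.0" ∈ common := by
          rcases hv0cases with rfl | rfl | rfl | rfl
          · exact absurd hv0mem h3
          · exact absurd hv0mem h2
          · exact absurd hv0mem h1
          · exact hv0mem
        have e0 : common.contains "TLS 1.0" = true := (hcont _).2 h0
        simp only [List.find?, e3, e2, e1, e0]
        rcases hmcases with rfl | rfl | rfl | rfl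
        · exact absurd hmcommon h3
        · exact absurd hmcommon h2
        · exact absurd hmcommon h1
        · rfl

-- ===== VERDICT (by name: the statement is the Claim_ definition above) =====
theorem negotiate_version_spec : Claim_equal_negotiate_version := by
  intro c s _ hpre
  unfold Spec_negotiate_version
  exact main_lemma c s hpre
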